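-- pv_equiv track=rewrite | github.com/arvindchari88/newGitTest | graph_functions.py | organize_failure
-- ===== SOURCE A (Python) =====
-- def organize_failure(t1_failure_pos) :
--   t1_general = []
--   t1_l_five = []
--   t1_r_five = []
--   t1_l_one = []
--   t1_r_one = []
--   t1_l_tab = []
--   t1_r_tab = [] #The positions to put the various graphs in the chart
--
--   t1_l_five_b = []
--   t1_r_five_b = []
--   t1_l_one_b = []
--   t1_r_one_b = []
--   t1_l_tab_b = []
--   t1_r_tab_b = []
--
--   t1_total_failures = [] #A list of lists, where the sublists are the failures of the tab, cage 1-4, and cage 5-8, and then general failures respectively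
--
--   for x in range(len(t1_failure_pos)) :
--     if t1_failure_pos[x][0] != "" :
--       if t1_failure_pos[x][1] == "A" :
--         if t1_failure_pos[x][0] == "Right Tab" :
--           t1_r_tab.append(t1_failure_pos[x][3])
--         elif t1_failure_pos[x][0] == "Left Tab" :
--           t1_l_tab.append(t1_failure_pos[x][3])
--         elif t1_failure_pos[x][0] == "Right Cage 1-4" :
--           t1_r_one.append(t1_failure_pos[x][3])
--         elif t1_failure_pos[x][0] == "Left Cage 1-4" :
--           t1_l_one.append(t1_failure_pos[x][3])
--         elif t1_failure_pos[x][0] == "Right Cage 5-8" :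
--           t1_r_five.append(t1_failure_pos[x][3])
--         elif t1_failure_pos[x][0] == "Left Cage 5-8" :
--           t1_l_five.append(t1_failure_pos[x][3])
--         else :
--           t1_general.append(t1_failure_pos[x][3])
--       elif t1_failure_pos[x][1] == "B" :
--         if t1_failure_pos[x][0] == "Right Tab" :
--           t1_r_tab_b.append(t1_failure_pos[x][3])
--         elif t1_failure_pos[x][0] == "Left Tab" :
--           t1_l_tab_b.append(t1_failure_pos[x][3])
--         elif t1_failure_pos[x][0] == "Right Cage 1-4" :
--           t1_r_one_b.append(t1_failure_pos[x][3])
--         elif t1_failure_pos[x][0] == "Left Cage 1-4" :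
--           t1_l_one_b.append(t1_failure_pos[x][3])
--         elif t1_failure_pos[x][0] == "Right Cage 5-8" :
--           t1_r_five_b.append(t1_failure_pos[x][3])
--         elif t1_failure_pos[x][0] == "Left Cage 5-8" :
--           t1_l_five_b.append(t1_failure_pos[x][3])
--         else :
--           t1_general.append(t1_failure_pos[x][3])
--       #Need to swap the l and r positions for the backside grids so that they appear the same way on the boards
--       elif t1_failure_pos[x][1] == "C" :
--         if t1_failure_pos[x][0] == "Right Tab" :
--           t1_l_tab.append(t1_failure_pos[x][3])
--         elif t1_failure_pos[x][0] == "Left Tab" :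
--           t1_r_tab.append(t1_failure_pos[x][3])
--         elif t1_failure_pos[x][0] == "Right Cage 1-4" :
--           t1_l_one.append(t1_failure_pos[x][3])
--         elif t1_failure_pos[x][0] == "Left Cage 1-4" :
--           t1_r_one.append(t1_failure_pos[x][3])
--         elif t1_failure_pos[x][0] == "Right Cage 5-8" :
--           t1_l_five.append(t1_failure_pos[x][3])
--         elif t1_failure_pos[x][0] == "Left Cage 5-8" :
--           t1_r_five.append(t1_failure_pos[x][3])
--         else :
--           t1_general.append(t1_failure_pos[x][3])
--       else :
--         if t1_failure_pos[x][0] == "Right Tab" :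
--           t1_l_tab_b.append(t1_failure_pos[x][3])
--         elif t1_failure_pos[x][0] == "Left Tab" :
--           t1_r_tab_b.append(t1_failure_pos[x][3])
--         elif t1_failure_pos[x][0] == "Right Cage 1-4" :
--           t1_l_one_b.append(t1_failure_pos[x][3])
--         elif t1_failure_pos[x][0] == "Left Cage 1-4" :
--           t1_r_one_b.append(t1_failure_pos[x][3])
--         elif t1_failure_pos[x][0] == "Right Cage 5-8" :
--           t1_l_five_b.append(t1_failure_pos[x][3])
--         elif t1_failure_pos[x][0] == "Left Cage 5-8" :
--           t1_r_five_b.append(t1_failure_pos[x][3])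
--         else :
--           t1_general.append(t1_failure_pos[x][3])
--
--   t1_total_failures.extend((t1_general, t1_l_five, t1_r_five, t1_l_one, t1_r_one, t1_l_tab, t1_r_tab, t1_l_five_b, t1_r_five_b, t1_l_one_b, t1_r_one_b, t1_l_tab_b, t1_r_tab_b))
--   t1_max_fails = max(len(t1_r_tab), len(t1_l_tab), len(t1_r_one), len(t1_l_one), len(t1_r_five), len(t1_l_five), len(t1_r_tab_b), len(t1_l_tab_b), len(t1_r_one_b), len(t1_l_one_b), len(t1_r_five_b), len(t1_l_five_b))
--
--   #If all the errors produced are located "General", then the length of t1_max_fails was producing a 0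
--   #We use t1_max_fails to size the circles on the pareto chart, so if this is zero, you get a divide by zero failure
--   if t1_max_fails == 0:
--     t1_max_fails = 1
--
--   return (t1_total_failures, t1_max_fails)
-- ===== SOURCE B (Python) =====
-- # Bucket slots 0..12: 0=general, 1=l_five, 2=r_five, 3=l_one, 4=r_one, 5=l_tab,
-- # 6=r_tab, and 7..12 the same six "_b" buckets (slot + 6).
-- _TABLE = {
--     "Right Tab": (True, 5), "Left Tab": (False, 5),
--     "Right Cage 1-4": (True, 3), "Left Cage 1-4": (False, 3),
--     "Right Cage 5-8": (True, 1), "Left Cage 5-8": (False, 1),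
-- }
--
-- def _slot(row):
--     """Bucket index for a row, or None if the row is skipped."""
--     if row[0] == "":
--         return None
--     hit = _TABLE.get(row[0])
--     if hit is None:
--         return 0
--     right, base = hit
--     ori = row[1]
--     if ori not in ("A", "B"):   # backside grids: swap left and right
--         right = not right
--     return base + (1 if right else 0) + (6 if ori not in ("A", "C") else 0)
--
-- def organize_failure(t1_failure_pos):
--     total = [[row[3] for row in t1_failure_pos if _slot(row) == k]
--              for k in range(13)]
--     mx = max(len(l) for l in total[1:])
--     return (total, max(mx, 1))
-- ===== Notes on version B (the rewrite author's own statement) =====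
-- stated objective: simpler
-- what changed: Replaced A's 28-branch if/elif chain over 13 accumulator variables by a per-row slot classifier (position dispatch table plus two orientation flags computed as slot arithmetic) and one filtered comprehension per bucket, with the max taken over the assembled buckets.
import Mathlib
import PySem

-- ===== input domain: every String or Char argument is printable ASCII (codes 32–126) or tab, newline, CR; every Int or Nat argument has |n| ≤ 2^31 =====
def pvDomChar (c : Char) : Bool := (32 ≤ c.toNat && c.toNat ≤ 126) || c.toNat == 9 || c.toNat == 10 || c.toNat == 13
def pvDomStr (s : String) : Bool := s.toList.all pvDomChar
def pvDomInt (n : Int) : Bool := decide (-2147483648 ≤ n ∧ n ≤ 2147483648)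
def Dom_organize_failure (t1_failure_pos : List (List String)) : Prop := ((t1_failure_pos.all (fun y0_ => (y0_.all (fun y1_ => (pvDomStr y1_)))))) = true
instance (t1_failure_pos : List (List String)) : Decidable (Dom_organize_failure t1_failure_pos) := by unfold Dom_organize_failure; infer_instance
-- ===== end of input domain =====

-- B replaces A's 28-branch if/elif chain and 13 accumulator variables by a small
-- per-row slot classifier (position table + two orientation flags) and one filtered
-- list per bucket; objective: simpler.  Equivalence is claimed on Pre_ (rows long
-- enough that A's indexing does not raise IndexError).

-- ===== PORT A =====
-- Loop state: A's thirteen accumulator lists, in declaration order.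
structure StA where
  g : List String
  lf : List String
  rf : List String
  lo : List String
  ro : List String
  lt : List String
  rt : List String
  lfb : List String
  rfb : List String
  lob : List String
  rob : List String
  ltb : List String
  rtb : List String

-- One iteration of A's for-loop.  row.getD i "" transcribes Python's row[i]:
-- Pre_ guarantees every index A reaches is in range, where the two agree exactly.
def stepA (s : StA) (row : List String) : StA :=
  if row.getD 0 "" ≠ "" then
    if row.getD 1 "" = "A" then
      if row.getD 0 "" = "Right Tab" then { s with rt := s.rt ++ [row.getD 3 ""] }
      else if row.getD 0 "" = "Left Tab" then { s with lt := s.lt ++ [row.getD 3 ""] }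
      else if row.getD 0 "" = "Right Cage 1-4" then { s with ro := s.ro ++ [row.getD 3 ""] }
      else if row.getD 0 "" = "Left Cage 1-4" then { s with lo := s.lo ++ [row.getD 3 ""] }
      else if row.getD 0 "" = "Right Cage 5-8" then { s with rf := s.rf ++ [row.getD 3 ""] }
      else if row.getD 0 "" = "Left Cage 5-8" then { s with lf := s.lf ++ [row.getD 3 ""] }
      else { s with g := s.g ++ [row.getD 3 ""] }
    else if row.getD 1 "" = "B" then
      if row.getD 0 "" = "Right Tab" then { s with rtb := s.rtb ++ [row.getD 3 ""] }
      else if row.getD 0 "" = "Left Tab" then { s with ltb := s.ltb ++ [row.getD 3 ""] }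
      else if row.getD 0 "" = "Right Cage 1-4" then { s with rob := s.rob ++ [row.getD 3 ""] }
      else if row.getD 0 "" = "Left Cage 1-4" then { s with lob := s.lob ++ [row.getD 3 ""] }
      else if row.getD 0 "" = "Right Cage 5-8" then { s with rfb := s.rfb ++ [row.getD 3 ""] }
      else if row.getD 0 "" = "Left Cage 5-8" then { s with lfb := s.lfb ++ [row.getD 3 ""] }
      else { s with g := s.g ++ [row.getD 3 ""] }
    else if row.getD 1 "" = "C" then
      if row.getD 0 "" = "Right Tab" then { s with lt := s.lt ++ [row.getD 3 ""] }
      else if row.getD 0 "" = "Left Tab" then { s with rt := s.rt ++ [row.getD 3 ""] }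
      else if row.getD 0 "" = "Right Cage 1-4" then { s with lo := s.lo ++ [row.getD 3 ""] }
      else if row.getD 0 "" = "Left Cage 1-4" then { s with ro := s.ro ++ [row.getD 3 ""] }
      else if row.getD 0 "" = "Right Cage 5-8" then { s with lf := s.lf ++ [row.getD 3 ""] }
      else if row.getD 0 "" = "Left Cage 5-8" then { s with rf := s.rf ++ [row.getD 3 ""] }
      else { s with g := s.g ++ [row.getD 3 ""] }
    else
      if row.getD 0 "" = "Right Tab" then { s with ltb := s.ltb ++ [row.getD 3 ""] }
      else if row.getD 0 "" = "Left Tab" then { s with rtb := s.rtb ++ [row.getD 3 ""] }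
      else if row.getD 0 "" = "Right Cage 1-4" then { s with lob := s.lob ++ [row.getD 3 ""] }
      else if row.getD 0 "" = "Left Cage 1-4" then { s with rob := s.rob ++ [row.getD 3 ""] }
      else if row.getD 0 "" = "Right Cage 5-8" then { s with lfb := s.lfb ++ [row.getD 3 ""] }
      else if row.getD 0 "" = "Left Cage 5-8" then { s with rfb := s.rfb ++ [row.getD 3 ""] }
      else { s with g := s.g ++ [row.getD 3 ""] }
  else s

def organize_failure (t1_failure_pos : List (List String)) : List (List String) × Int :=
  let s := t1_failure_pos.foldl stepA ⟨[], [], [], [], [], [], [], [], [], [], [], [], []⟩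
  let total := [s.g, s.lf, s.rf, s.lo, s.ro, s.lt, s.rt, s.lfb, s.rfb, s.lob, s.rob, s.ltb, s.rtb]
  -- Python max(len(r_tab), len(l_tab), ..., len(l_five_b)) over the 12 non-general lists
  let m : Nat := s.rt.length.max (s.lt.length.max (s.ro.length.max (s.lo.length.max
      (s.rf.length.max (s.lf.length.max (s.rtb.length.max (s.ltb.length.max
      (s.rob.length.max (s.lob.length.max (s.rfb.length.max s.lfb.length))))))))))
  (total, if m = 0 then 1 else (m : Int))

-- ===== PORT B =====
-- B's _TABLE lookup: position → (isRight, base slot index), none for unknown positions.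
def tableB (p : String) : Option (Bool × Nat) :=
  if p = "Right Tab" then some (true, 5)
  else if p = "Left Tab" then some (false, 5)
  else if p = "Right Cage 1-4" then some (true, 3)
  else if p = "Left Cage 1-4" then some (false, 3)
  else if p = "Right Cage 5-8" then some (true, 1)
  else if p = "Left Cage 5-8" then some (false, 1)
  else none

-- B's _slot: bucket index 0..12 for a row, none if the row is skipped.
def slotB (row : List String) : Option Nat :=
  if row.getD 0 "" = "" then none
  else
    match tableB (row.getD 0 "") with
    | none => some 0
    | some (r, base) =>
        let ori := row.getD 1 ""
        let r' := if ori ≠ "A" ∧ ori ≠ "B" then !r else r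
        some (base + (if r' then 1 else 0) + (if ori ≠ "A" ∧ ori ≠ "C" then 6 else 0))

-- B's per-bucket comprehension  [row[3] for row in rows if _slot(row) == k]
def bucketB (rows : List (List String)) (k : Nat) : List String :=
  (rows.filter (fun row => slotB row == some k)).map (fun row => row.getD 3 "")

def organize_failure_alt (t1_failure_pos : List (List String)) : List (List String) × Int :=
  let total := (List.range 13).map (bucketB t1_failure_pos)
  let mx : Nat := (total.drop 1).foldl (fun m l => m.max l.length) 0
  (total, ((mx.max 1 : Nat) : Int))

-- ===== PRECONDITION & SPEC =====
-- Pre_ excludes exactly the inputs where A raises IndexError: a row must be nonempty,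
-- and if its first entry is non-empty A also reads row[1] and row[3], so it needs length ≥ 4.
def Pre_organize_failure (t1_failure_pos : List (List String)) : Prop :=
  ∀ row ∈ t1_failure_pos, 1 ≤ row.length ∧ (row.getD 0 "" ≠ "" → 4 ≤ row.length)
instance (t1_failure_pos : List (List String)) : Decidable (Pre_organize_failure t1_failure_pos) := by
  unfold Pre_organize_failure; infer_instance

def pvWitness_organize_failure : List (List String) :=
  [["Right Tab", "C", "x", "F1"], ["mystery", "B", "x", "F2"], [""]]

def Spec_organize_failure (t1_failure_pos : List (List String)) (out : List (List String) × Int) : Prop := out = organize_failure_alt t1_failure_pos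
instance (t1_failure_pos : List (List String)) (out : List (List String) × Int) : Decidable (Spec_organize_failure t1_failure_pos out) := by unfold Spec_organize_failure; infer_instance

-- ===== CLAIM (what is proved, stated in full; the proofs are below) =====
def Claim_equal_organize_failure : Prop := ∀ (t1_failure_pos : List (List String)), Dom_organize_failure t1_failure_pos → Pre_organize_failure t1_failure_pos → Spec_organize_failure t1_failure_pos (organize_failure t1_failure_pos)

-- ===== LEMMAS AND PROOFS =====

-- addKey: the effect of routing value v to bucket k, written field-by-field.
def addKey (s : StA) (k : Nat) (v : String) : StA :=
  { g := s.g ++ (if k = 0 then [v] else []),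
    lf := s.lf ++ (if k = 1 then [v] else []),
    rf := s.rf ++ (if k = 2 then [v] else []),
    lo := s.lo ++ (if k = 3 then [v] else []),
    ro := s.ro ++ (if k = 4 then [v] else []),
    lt := s.lt ++ (if k = 5 then [v] else []),
    rt := s.rt ++ (if k = 6 then [v] else []),
    lfb := s.lfb ++ (if k = 7 then [v] else []),
    rfb := s.rfb ++ (if k = 8 then [v] else []),
    lob := s.lob ++ (if k = 9 then [v] else []),
    rob := s.rob ++ (if k = 10 then [v] else []),
    ltb := s.ltb ++ (if k = 11 then [v] else []),
    rtb := s.rtb ++ (if k = 12 then [v] else []) }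

set_option maxHeartbeats 1000000 in
lemma step_eq (s : StA) (row : List String) :
    stepA s row = match slotB row with
      | none => s
      | some k => addKey s k (row.getD 3 "") := by
  by_cases h0 : row.getD 0 "" = ""
  · simp_all [stepA, slotB]
  · by_cases hA : row.getD 1 "" = "A"
    · by_cases p1 : row.getD 0 "" = "Right Tab"
      · simp_all [stepA, slotB, tableB, addKey]
      ·
        by_cases p2 : row.getD 0 "" = "Left Tab"
        · simp_all [stepA, slotB, tableB, addKey]
        ·
          by_cases p3 : row.getD 0 "" = "Right Cage 1-4"
          · simp_all [stepA, slotB, tableB, addKey]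
          ·
            by_cases p4 : row.getD 0 "" = "Left Cage 1-4"
            · simp_all [stepA, slotB, tableB, addKey]
            ·
              by_cases p5 : row.getD 0 "" = "Right Cage 5-8"
              · simp_all [stepA, slotB, tableB, addKey]
              ·
                by_cases p6 : row.getD 0 "" = "Left Cage 5-8"
                · simp_all [stepA, slotB, tableB, addKey]
                · simp_all [stepA, slotB, tableB, addKey]
    · by_cases hB : row.getD 1 "" = "B"
      · by_cases p1 : row.getD 0 "" = "Right Tab"
        · simp_all [stepA, slotB, tableB, addKey]
        ·
          by_cases p2 : row.getD 0 "" = "Left Tab"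
          · simp_all [stepA, slotB, tableB, addKey]
          ·
            by_cases p3 : row.getD 0 "" = "Right Cage 1-4"
            · simp_all [stepA, slotB, tableB, addKey]
            ·
              by_cases p4 : row.getD 0 "" = "Left Cage 1-4"
              · simp_all [stepA, slotB, tableB, addKey]
              ·
                by_cases p5 : row.getD 0 "" = "Right Cage 5-8"
                · simp_all [stepA, slotB, tableB, addKey]
                ·
                  by_cases p6 : row.getD 0 "" = "Left Cage 5-8"
                  · simp_all [stepA, slotB, tableB, addKey]
                  · simp_all [stepA, slotB, tableB, addKey]
      · by_cases hC : row.getD 1 "" = "C"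
        · by_cases p1 : row.getD 0 "" = "Right Tab"
          · simp_all [stepA, slotB, tableB, addKey]
          ·
            by_cases p2 : row.getD 0 "" = "Left Tab"
            · simp_all [stepA, slotB, tableB, addKey]
            ·
              by_cases p3 : row.getD 0 "" = "Right Cage 1-4"
              · simp_all [stepA, slotB, tableB, addKey]
              ·
                by_cases p4 : row.getD 0 "" = "Left Cage 1-4"
                · simp_all [stepA, slotB, tableB, addKey]
                ·
                  by_cases p5 : row.getD 0 "" = "Right Cage 5-8"
                  · simp_all [stepA, slotB, tableB, addKey]
                  ·
                    by_cases p6 : row.getD 0 "" = "Left Cage 5-8"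
                    · simp_all [stepA, slotB, tableB, addKey]
                    · simp_all [stepA, slotB, tableB, addKey]
        · by_cases p1 : row.getD 0 "" = "Right Tab"
          · simp_all [stepA, slotB, tableB, addKey]
          ·
            by_cases p2 : row.getD 0 "" = "Left Tab"
            · simp_all [stepA, slotB, tableB, addKey]
            ·
              by_cases p3 : row.getD 0 "" = "Right Cage 1-4"
              · simp_all [stepA, slotB, tableB, addKey]
              ·
                by_cases p4 : row.getD 0 "" = "Left Cage 1-4"
                · simp_all [stepA, slotB, tableB, addKey]
                ·
                  by_cases p5 : row.getD 0 "" = "Right Cage 5-8"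
                  · simp_all [stepA, slotB, tableB, addKey]
                  ·
                    by_cases p6 : row.getD 0 "" = "Left Cage 5-8"
                    · simp_all [stepA, slotB, tableB, addKey]
                    · simp_all [stepA, slotB, tableB, addKey]

lemma bucket_nil (k : Nat) : bucketB [] k = [] := rfl

lemma bucket_cons (row : List String) (rest : List (List String)) (k : Nat) :
    bucketB (row :: rest) k =
      (if slotB row = some k then [row.getD 3 ""] else []) ++ bucketB rest k := by
  simp only [bucketB, List.filter_cons]
  split_ifs with h h' h'
  · simp
  · simp_all
  · simp_all
  · rfl

lemma foldl_eq (rows : List (List String)) : ∀ s : StA,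
    rows.foldl stepA s =
      ⟨s.g ++ bucketB rows 0,
       s.lf ++ bucketB rows 1, s.rf ++ bucketB rows 2,
       s.lo ++ bucketB rows 3, s.ro ++ bucketB rows 4,
       s.lt ++ bucketB rows 5, s.rt ++ bucketB rows 6,
       s.lfb ++ bucketB rows 7, s.rfb ++ bucketB rows 8,
       s.lob ++ bucketB rows 9, s.rob ++ bucketB rows 10,
       s.ltb ++ bucketB rows 11, s.rtb ++ bucketB rows 12⟩ := by
  induction rows with
  | nil => intro s; simp [bucket_nil]
  | cons row rest ih =>
      intro s
      simp only [List.foldl_cons, ih, step_eq, bucket_cons]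
      cases h : slotB row with
      | none => simp
      | some k => simp [addKey, List.append_assoc]

-- ===== VERDICT (by name: the statement is the Claim_ definition above) =====
set_option maxHeartbeats 2000000 in
theorem organize_failure_spec : Claim_equal_organize_failure := by
  intro rows _ _
  unfold Spec_organize_failure organize_failure organize_failure_alt
  have hr : List.range 13 = [0,1,2,3,4,5,6,7,8,9,10,11,12] := by decide
  rw [hr]
  simp only [foldl_eq, List.nil_append, List.map_cons, List.map_nil, List.drop_succ_cons,
    List.drop_zero, List.foldl_cons, List.foldl_nil]
  simp only [Prod.mk.injEq]
  refine ⟨trivial, ?_⟩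
  generalize bucketB rows 1 = a1
  generalize bucketB rows 2 = a2
  generalize bucketB rows 3 = a3
  generalize bucketB rows 4 = a4
  generalize bucketB rows 5 = a5
  generalize bucketB rows 6 = a6
  generalize bucketB rows 7 = b1
  generalize bucketB rows 8 = b2
  generalize bucketB rows 9 = b3
  generalize bucketB rows 10 = b4
  generalize bucketB rows 11 = b5
  generalize bucketB rows 12 = b6
  have hMN : ((((((((((((Nat.max 0 a1.length).max a2.length).max a3.length).max
      a4.length).max a5.length).max a6.length).max b1.length).max b2.length).max
      b3.length).max b4.length).max b5.length).max b6.length) =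
      a6.length.max (a5.length.max (a4.length.max (a3.length.max
      (a2.length.max (a1.length.max (b6.length.max (b5.length.max
      (b4.length.max (b3.length.max (b2.length.max b1.length)))))))))) := by
    simp [Nat.max_comm, Nat.max_left_comm]
  rw [hMN]
  rcases Nat.eq_zero_or_pos (a6.length.max (a5.length.max (a4.length.max (a3.length.max
      (a2.length.max (a1.length.max (b6.length.max (b5.length.max
      (b4.length.max (b3.length.max (b2.length.max b1.length))))))))))) with h | h
  · simp [h]
  · rw [if_neg (by omega)]
    exact_mod_cast (Nat.max_eq_left h).symm
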